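-- pv_equiv track=rewrite | github.com/anasknbar/CS50-P | Lec_2/plates/plates.py | no_number_in_the_middle
-- ===== SOURCE A (Python) =====
-- def no_number_in_the_middle(s):
--   string = ''
--   for index,char in enumerate(s) :
--     if char.isdigit():
--       string = (s[index:])
--       break
--     else:
--       continue
--   if len(string) > 0:
--     if string.isdigit() and string[0] != '0':
--       return True
--     else:
--       return False
--   else:
--     return True
-- ===== SOURCE B (Python) =====
-- def no_number_in_the_middle(s):
--     first = None  # first digit seen, or None
--     for ch in s:
--         if ch.isdigit():
--             if first is None:
--                 first = ch
--         elif first is not None: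
--             return False
--     return first is None or first != '0'
-- ===== Notes on version B (the rewrite author's own statement) =====
-- stated objective: simpler
-- what changed: Replaces the enumerate/slice/str.isdigit suffix check with a single forward pass that remembers the first digit seen and rejects as soon as a non-digit follows a digit.
import Mathlib
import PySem

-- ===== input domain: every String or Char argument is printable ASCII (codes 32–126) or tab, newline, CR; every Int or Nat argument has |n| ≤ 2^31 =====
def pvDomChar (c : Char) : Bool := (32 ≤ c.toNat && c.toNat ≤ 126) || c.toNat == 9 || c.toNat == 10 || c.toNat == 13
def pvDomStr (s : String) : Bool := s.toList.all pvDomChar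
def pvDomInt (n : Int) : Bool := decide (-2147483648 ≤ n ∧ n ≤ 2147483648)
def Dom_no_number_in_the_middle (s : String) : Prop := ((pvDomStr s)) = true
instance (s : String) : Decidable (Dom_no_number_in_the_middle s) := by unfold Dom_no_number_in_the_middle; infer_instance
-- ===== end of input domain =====

-- B replaces A's enumerate/slice/str.isdigit suffix test by a single forward pass
-- that remembers the first digit seen and fails as soon as a non-digit follows a digit (objective: simpler).

-- ===== PORT A =====
-- the for/enumerate loop with break: returns s[index:] for the first digit index, '' if none
def noNumA_find : List Char → List Char
  | [] => []
  | c :: cs => if PySem.Chars.isdigit c then c :: cs else noNumA_find cs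

def no_number_in_the_middle (s : String) : Bool :=
  let string := noNumA_find s.toList
  if string.length > 0 then
    if PySem.Chars.strIsdigit string && decide (PySem.List.pyGet? string 0 ≠ some '0') then
      true
    else
      false
  else
    true

-- ===== PORT B =====
-- the for loop of Source B: state = first digit seen (or none); early False on a non-digit after a digit
def noNumB_loop : List Char → Option Char → Bool
  | [], first => match first with
    | none => true
    | some d => decide (d ≠ '0')
  | c :: cs, first =>
    if PySem.Chars.isdigit c then
      noNumB_loop cs (some (first.getD c))
    else
      match first with
      | none => noNumB_loop cs none
      | some _ => false

def no_number_in_the_middle_alt (s : String) : Bool :=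
  noNumB_loop s.toList none

-- ===== PRECONDITION & SPEC =====
def Spec_no_number_in_the_middle (s : String) (out : Bool) : Prop := out = no_number_in_the_middle_alt s
instance (s : String) (out : Bool) : Decidable (Spec_no_number_in_the_middle s out) := by unfold Spec_no_number_in_the_middle; infer_instance

-- ===== CLAIM (what is proved, stated in full; the proofs are below) =====
def Claim_equal_no_number_in_the_middle : Prop := ∀ (s : String), Dom_no_number_in_the_middle s → Spec_no_number_in_the_middle s (no_number_in_the_middle s)

-- ===== LEMMAS AND PROOFS =====

-- once a digit has been recorded, B's loop demands all remaining chars be digits and judges the recorded one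
theorem noNumB_loop_some (cs : List Char) (d : Char) :
    noNumB_loop cs (some d) = (cs.all PySem.Chars.isdigit && decide (d ≠ '0')) := by
  induction cs with
  | nil => simp [noNumB_loop]
  | cons c cs ih =>
    simp only [noNumB_loop, Option.getD, List.all_cons]
    by_cases h : PySem.Chars.isdigit c = true <;> simp [h, ih]

theorem noNum_eq_on_list (l : List Char) :
    (let string := noNumA_find l;
     if string.length > 0 then
       if PySem.Chars.strIsdigit string && decide (PySem.List.pyGet? string 0 ≠ some '0') then true else false
     else true) = noNumB_loop l none := by
  induction l with
  | nil => simp [noNumA_find, noNumB_loop]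
  | cons c cs ih =>
    by_cases h : PySem.Chars.isdigit c = true
    · simp only [noNumA_find, noNumB_loop, h, if_pos, Option.getD, noNumB_loop_some]
      simp [PySem.Chars.strIsdigit, PySem.List.pyGet?, PySem.List.pyIdx?, h]
      by_cases hc : c = '0'
      · simp [hc]
      · simp only [hc]
        rw [Bool.eq_iff_iff]
        simp [List.all_eq_true]
    · simpa [noNumA_find, noNumB_loop, h] using ih

-- ===== VERDICT (by name: the statement is the Claim_ definition above) =====
theorem no_number_in_the_middle_spec : Claim_equal_no_number_in_the_middle := by
  intro s _
  unfold Spec_no_number_in_the_middle no_number_in_the_middle no_number_in_the_middle_alt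
  exact noNum_eq_on_list s.toList
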